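-- pv_equiv track=rewrite | github.com/noriyasuohkubo/bin_op | util.py | get_weeknum
-- ===== SOURCE A (Python) =====
-- def get_weeknum(weekday, day):
--
--     #1週間前の日付が同月かどうか調べる -> 1日より前か後かで判別
--     #dayが1日以降(同月)なら出現回数+1してdayに1週間前の日付を代入(-7する)、1日より前(前の月の日付)なら処理終了
--     weeks = 0
--     while day > 0:
--         weeks += 1
--         day -= 7
--
--     """
--     例：今日が2017/11/13の場合、day = 13
--     1ループ目・・・ day(=13) > 0 なので出現回数+1(weeks += 1)、1週間前の日付代入(day -= 7)
--     2ループ目・・・ day(=6) > 0 なので出現回数+1(weeks += 1)、1週間前の日付代入(day -= 7)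
--     3ループ目・・・ day(=-1)は day > 0 を満たさないのでループを抜ける
--     """
--
--     #第一月曜なら0、第二火曜なら8。第五日曜である34まである想定
--     #第一金曜日なら4
--     return weekday + ((weeks - 1) * 7)
-- ===== SOURCE B (Python) =====
-- def get_weeknum(weekday, day):
--     weeks = max(0, (day + 6) // 7)
--     return weekday + (weeks - 1) * 7
-- ===== Notes on version B (the rewrite author's own statement) =====
-- stated objective: simpler
-- what changed: Replaced the while loop that subtracts 7 until day <= 0 with the closed form max(0,(day+6)//7): pure arithmetic, no loop or accumulator.
import Mathlib
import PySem

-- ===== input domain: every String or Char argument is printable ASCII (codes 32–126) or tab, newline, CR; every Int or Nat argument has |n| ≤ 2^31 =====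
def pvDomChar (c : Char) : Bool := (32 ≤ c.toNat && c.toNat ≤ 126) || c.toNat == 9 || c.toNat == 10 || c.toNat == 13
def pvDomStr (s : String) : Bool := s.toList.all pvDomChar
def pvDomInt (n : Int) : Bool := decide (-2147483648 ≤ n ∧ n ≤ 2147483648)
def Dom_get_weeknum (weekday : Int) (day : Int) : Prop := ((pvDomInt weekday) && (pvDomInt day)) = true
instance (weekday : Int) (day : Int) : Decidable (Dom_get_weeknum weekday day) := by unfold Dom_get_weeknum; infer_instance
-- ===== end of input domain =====

-- ===== PORT A =====
-- while loop of A: counts weeks, subtracting 7 until day ≤ 0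
def get_weeknum_loop (weeks : Int) (day : Int) : Int :=
  if day > 0 then get_weeknum_loop (weeks + 1) (day - 7) else weeks
termination_by day.toNat
decreasing_by omega

def get_weeknum (weekday : Int) (day : Int) : Int :=
  weekday + ((get_weeknum_loop 0 day) - 1) * 7

-- ===== PORT B =====
def get_weeknum_alt (weekday : Int) (day : Int) : Int :=
  weekday + (max 0 (PySem.Int.floordiv (day + 6) 7) - 1) * 7

-- ===== PRECONDITION & SPEC =====
def Spec_get_weeknum (weekday : Int) (day : Int) (out : Int) : Prop := out = get_weeknum_alt weekday day
instance (weekday : Int) (day : Int) (out : Int) : Decidable (Spec_get_weeknum weekday day out) := by unfold Spec_get_weeknum; infer_instance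

-- ===== CLAIM (what is proved, stated in full; the proofs are below) =====
def Claim_equal_get_weeknum : Prop := ∀ (weekday : Int) (day : Int), Dom_get_weeknum weekday day → Spec_get_weeknum weekday day (get_weeknum weekday day)

-- ===== LEMMAS AND PROOFS =====


-- ===== VERDICT (by name: the statement is the Claim_ definition above) =====
theorem loop_closed (weeks day : Int) :
    get_weeknum_loop weeks day = weeks + max 0 (PySem.Int.floordiv (day + 6) 7) := by
  fun_induction get_weeknum_loop with
  | case1 w d h ih =>
    rw [ih, PySem.Int.floordiv_eq_ediv_of_pos (by omega),
        PySem.Int.floordiv_eq_ediv_of_pos (by omega)]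
    omega
  | case2 w d h =>
    rw [PySem.Int.floordiv_eq_ediv_of_pos (by omega)]
    omega

theorem get_weeknum_spec : Claim_equal_get_weeknum := by
  intro weekday day _
  unfold Spec_get_weeknum get_weeknum get_weeknum_alt
  rw [loop_closed]
  ring
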